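-- pv_equiv track=rewrite | github.com/Xornet-Euphoria/InterKosenCTF_2019 | Kurukuru_Shuffle/decode.py | make_st_list
-- ===== SOURCE A (Python) =====
-- def make_st_list(a, b, k, L):
--     _list = []
--     i = k
--     for _ in range(L):
--         s = (i + a) % L
--         t = (i + b) % L
--         i = (i + k) % L
--         _list.append([s, t])
--
--     return _list
-- ===== SOURCE B (Python) =====
-- def _gcd(x, y):
--     return x if y == 0 else _gcd(y, x % y)
--
--
-- def make_st_list(a, b, k, L):
--     # The step sequence i = k, 2k, 3k, ... mod L is periodic with period
--     # p = L / gcd(k, L); build one period and tile it gcd(k, L) times.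
--     if L <= 0:
--         return []
--     g = _gcd(abs(k), L)
--     p = L // g
--     block = [[((m + 1) * k + a) % L, ((m + 1) * k + b) % L] for m in range(p)]
--     return block * g
-- ===== Notes on version B (the rewrite author's own statement) =====
-- stated objective: alternative
-- what changed: Instead of iterating a running accumulator L times, B uses number theory: the residue sequence k, 2k, 3k, ... mod L is periodic with period p = L/gcd(k,L), so B computes gcd via recursive Euclid, builds the single period of p pairs, and tiles it gcd(k,L) times with list repetition.
import Mathlib
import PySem

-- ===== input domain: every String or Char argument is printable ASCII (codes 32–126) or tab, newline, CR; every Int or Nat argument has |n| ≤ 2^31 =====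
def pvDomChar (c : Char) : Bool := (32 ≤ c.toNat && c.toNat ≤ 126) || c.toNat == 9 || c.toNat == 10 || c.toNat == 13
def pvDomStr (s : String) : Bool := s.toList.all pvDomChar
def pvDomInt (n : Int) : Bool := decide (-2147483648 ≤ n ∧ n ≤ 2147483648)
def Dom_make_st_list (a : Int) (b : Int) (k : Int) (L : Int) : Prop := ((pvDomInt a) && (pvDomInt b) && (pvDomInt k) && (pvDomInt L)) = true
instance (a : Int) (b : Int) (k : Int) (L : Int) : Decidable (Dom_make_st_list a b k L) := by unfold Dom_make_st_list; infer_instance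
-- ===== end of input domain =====

-- B replaces A's length-L stateful accumulator loop by number theory: the step
-- sequence is periodic with period L/gcd(k,L), so B builds one period and tiles it
-- gcd(k,L) times (objective: alternative).

-- ===== PORT A =====
def make_st_list (a : Int) (b : Int) (k : Int) (L : Int) : List (List Int) :=
  ((PySem.List.pyRange 0 L 1).foldl
    (fun (st : Int × List (List Int)) _ =>
      let s := PySem.Int.mod (st.1 + a) L
      let t := PySem.Int.mod (st.1 + b) L
      (PySem.Int.mod (st.1 + k) L, st.2 ++ [[s, t]]))
    (k, [])).2

-- ===== PORT B =====
-- termination helper for the Euclid recursion (cited by name in decreasing_by)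
lemma pvGcd_dec (x y : Int) (h : y ≠ 0) : (PySem.Int.mod x y).natAbs < y.natAbs := by
  rcases lt_or_gt_of_ne h with hy | hy
  · have h1 := PySem.Int.mod_neg_bounds x hy
    omega
  · have h1 := PySem.Int.mod_nonneg x hy
    have h2 := PySem.Int.mod_lt x hy
    omega

-- Python helper _gcd(x, y): recursive Euclid
def pvGcd (x y : Int) : Int :=
  if y = 0 then x else pvGcd y (PySem.Int.mod x y)
termination_by y.natAbs
decreasing_by exact pvGcd_dec x y (by assumption)

def make_st_list_alt (a : Int) (b : Int) (k : Int) (L : Int) : List (List Int) :=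
  if L ≤ 0 then []
  else
    let g := pvGcd |k| L
    let p := PySem.Int.floordiv L g
    let block := (PySem.List.pyRange 0 p 1).map
      (fun m => [PySem.Int.mod ((m + 1) * k + a) L, PySem.Int.mod ((m + 1) * k + b) L])
    PySem.List.pyRepeat block g

-- ===== PRECONDITION & SPEC =====
def Spec_make_st_list (a : Int) (b : Int) (k : Int) (L : Int) (out : List (List Int)) : Prop := out = make_st_list_alt a b k L
instance (a : Int) (b : Int) (k : Int) (L : Int) (out : List (List Int)) : Decidable (Spec_make_st_list a b k L out) := by unfold Spec_make_st_list; infer_instance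

-- ===== CLAIM =====
def Claim_equal_make_st_list : Prop := ∀ (a : Int) (b : Int) (k : Int) (L : Int), Dom_make_st_list a b k L → Spec_make_st_list a b k L (make_st_list a b k L)

-- ===== LEMMAS AND PROOFS =====

-- congruence of the shifted residue: if i ≡ j [emod L] then (i+c) % L = (j+c) % L
lemma mod_shift_congr (L i j c : Int) (h : i % L = j % L) :
    (i + c) % L = (j + c) % L := by
  rw [← Int.emod_add_emod i L c, h, Int.emod_add_emod]

-- loop invariant for A: with the accumulator congruent to (n+1)*k mod L, the remaining
-- fold appends exactly the closed-form elements for the remaining indices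
lemma loop_eq (a b k L : Int) (hL : 0 < L) :
    ∀ (m : Nat) (n i : Int), n + (m : Int) = L →
      i % L = ((n + 1) * k) % L →
      ∀ acc : List (List Int),
      ((PySem.List.pyRange n L 1).foldl
        (fun (st : Int × List (List Int)) _ =>
          let s := PySem.Int.mod (st.1 + a) L
          let t := PySem.Int.mod (st.1 + b) L
          (PySem.Int.mod (st.1 + k) L, st.2 ++ [[s, t]]))
        (i, acc)).2
      = acc ++ (PySem.List.pyRange n L 1).map
          (fun n => [PySem.Int.mod ((n + 1) * k + a) L, PySem.Int.mod ((n + 1) * k + b) L]) := by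
  intro m
  induction m with
  | zero =>
    intro n i hn _ acc
    rw [PySem.List.pyRange_one_eq_nil (by omega)]
    simp
  | succ m ih =>
    intro n i hn hi acc
    rw [PySem.List.pyRange_one_cons (by omega)]
    simp only [List.foldl_cons, List.map_cons]
    have hmod : ∀ c : Int, PySem.Int.mod (i + c) L = PySem.Int.mod ((n + 1) * k + c) L := by
      intro c
      rw [PySem.Int.mod_eq_emod_of_pos hL, PySem.Int.mod_eq_emod_of_pos hL]
      exact mod_shift_congr L i ((n + 1) * k) c hi
    have hi' : PySem.Int.mod (i + k) L % L = ((n + 1 + 1) * k) % L := by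
      rw [PySem.Int.mod_eq_emod_of_pos hL, Int.emod_emod_of_dvd _ dvd_rfl]
      have := mod_shift_congr L i ((n + 1) * k) k hi
      rw [this]; ring_nf
    rw [ih (n + 1) _ (by omega) hi']
    simp [hmod a, hmod b]

-- pvGcd of (nonneg, positive) arguments is a positive common divisor
lemma pvGcd_pos_dvd : ∀ (N : Nat) (y x : Int), y.natAbs ≤ N → 0 ≤ x → 0 < y →
    0 < pvGcd x y ∧ pvGcd x y ∣ x ∧ pvGcd x y ∣ y := by
  intro N
  induction N with
  | zero => intro y x hN hx hy; omega
  | succ N ih =>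
    intro y x hN hx hy
    rw [pvGcd]
    rw [if_neg (by omega : ¬ y = 0)]
    have hm : PySem.Int.mod x y = x % y := PySem.Int.mod_eq_emod_of_pos hy
    have hr0 : 0 ≤ x % y := Int.emod_nonneg x (by omega)
    have hrlt : x % y < y := Int.emod_lt_of_pos x hy
    rcases eq_or_lt_of_le hr0 with hr | hr
    · -- remainder is zero: one more unfold gives y
      rw [hm, ← hr, pvGcd, if_pos rfl]
      refine ⟨hy, ⟨x / y, ?_⟩, dvd_rfl⟩
      have h := Int.ediv_add_emod x y
      rw [← hr, add_zero] at h
      exact h.symm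
    · have ⟨h1, h2, h3⟩ := ih (x % y) y (by omega) (le_of_lt hy) hr
      rw [hm]
      refine ⟨h1, ?_, h2⟩
      have hd := dvd_add (h2.mul_right (x / y)) h3
      rwa [Int.ediv_add_emod x y] at hd

-- ===== VERDICT =====
theorem make_st_list_spec : Claim_equal_make_st_list := by
  intro a b k L _
  unfold Spec_make_st_list
  by_cases hL : 0 < L
  · -- A = map of the closed form over range L
    have hA : make_st_list a b k L =
        (PySem.List.pyRange 0 L 1).map
          (fun n => [PySem.Int.mod ((n + 1) * k + a) L, PySem.Int.mod ((n + 1) * k + b) L]) := by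
      unfold make_st_list
      have := loop_eq a b k L hL L.toNat 0 k (by omega) (by norm_num) []
      simpa using this
    set f : Int → List Int :=
      fun n => [PySem.Int.mod ((n + 1) * k + a) L, PySem.Int.mod ((n + 1) * k + b) L] with hf
    -- properties of g and p
    obtain ⟨hg, hgk', hgL⟩ :=
      pvGcd_pos_dvd L.natAbs L |k| le_rfl (abs_nonneg k) hL
    set g := pvGcd |k| L with hgdef
    have hgk : g ∣ k := (dvd_abs g k).mp hgk'
    set p := PySem.Int.floordiv L g with hpdef
    have hpe : p = L / g := PySem.Int.floordiv_eq_ediv_of_pos hg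
    have hpg : p * g = L := by rw [hpe]; exact Int.ediv_mul_cancel hgL
    have hp : 0 < p := by nlinarith
    have hLpk : L ∣ p * k := by
      obtain ⟨k', hk'⟩ := hgk
      exact ⟨k', by rw [hk', ← hpg]; ring⟩
    -- periodicity of f with period p (any multiple of p)
    have hper : ∀ (j m : Int), f (j * p + m) = f m := by
      intro j m
      obtain ⟨e, he⟩ := hLpk
      have key : ∀ c : Int, PySem.Int.mod ((j * p + m + 1) * k + c) L
          = PySem.Int.mod ((m + 1) * k + c) L := by
        intro c
        rw [PySem.Int.mod_eq_emod_of_pos hL, PySem.Int.mod_eq_emod_of_pos hL]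
        have harith : (j * p + m + 1) * k + c = ((m + 1) * k + c) + (j * e) * L := by
          have : p * k = L * e := he
          linear_combination j * this
        rw [harith, Int.add_mul_emod_self_right _ _ _]
      simp only [hf, key a, key b]
    set block := (PySem.List.pyRange 0 p 1).map f with hblock
    -- a p-chunk of the range starting at any multiple of p maps to block
    have hchunk : ∀ j : Int, (PySem.List.pyRange (j * p) (j * p + p) 1).map f = block := by
      intro j
      rw [hblock, PySem.List.pyRange_one, PySem.List.pyRange_one]
      simp only [List.map_map, sub_zero]
      have hlen : (j * p + p - j * p).toNat = p.toNat := by omega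
      rw [hlen]
      refine List.map_congr_left ?_
      intro m _
      simp only [Function.comp_apply]
      have : f (j * p + (m : Int)) = f (m : Int) := hper j (m : Int)
      simpa using this
    -- tiling block q times equals the closed-form map over q·p consecutive indices
    have tile : ∀ (q : Nat) (j : Int),
        (List.replicate q block).flatten
          = (PySem.List.pyRange (j * p) (j * p + (q : Int) * p) 1).map f := by
      intro q
      induction q with
      | zero =>
        intro j
        rw [PySem.List.pyRange_one_eq_nil (by push_cast; omega)]
        simp
      | succ q ih =>
        intro j
        have hsplit := PySem.List.pyRange_one_append (j * p) (j * p + p)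
          (j * p + ((q : Nat) + 1 : Int) * p) (by nlinarith) (by nlinarith)
        rw [List.replicate_succ, List.flatten_cons]
        have hend : j * p + ((q + 1 : Nat) : Int) * p = j * p + ((q : Nat) + 1 : Int) * p := by
          push_cast; ring
        rw [hend, hsplit, List.map_append, hchunk j]
        congr 1
        have h1 : j * p + p = (j + 1) * p := by ring
        have h2 : j * p + ((q : Nat) + 1 : Int) * p = (j + 1) * p + (q : Nat) * p := by ring
        rw [h1, h2, ih (j + 1)]
    -- assemble
    have hB : make_st_list_alt a b k L = (List.replicate g.toNat block).flatten := by
      unfold make_st_list_alt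
      rw [if_neg (by omega)]
      rfl
    rw [hA, hB, tile g.toNat 0]
    have : (0 : Int) * p + (g.toNat : Int) * p = L := by
      rw [Int.toNat_of_nonneg (le_of_lt hg)]; nlinarith
    rw [zero_mul, zero_add] at this ⊢
    rw [this]
  · -- L ≤ 0: both sides are empty
    unfold make_st_list make_st_list_alt
    rw [PySem.List.pyRange_one_eq_nil (by omega), if_pos (by omega)]
    simp
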